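-- pv_equiv track=rewrite | github.com/fernandodiaz-code/tarea-analisis-de-algoritmos | codigo.py | max_gain_professor_hash
-- ===== SOURCE A (Python) =====
-- from math import inf
--
-- def max_gain_professor_hash(values):
--     """
--     Igual que max_gain_professor_array pero usando un diccionario
--     para memoización en vez de una matriz 2D.
--     """
--     n2 = len(values)
--     if n2 % 2 != 0:
--         raise ValueError("La lista debe tener longitud par (2n).")
--
--     n = n2 // 2
--
--     S = values + values
--     N = len(S)
--
--     pref = [0] * (N + 1)
--     for i in range(N):
--         pref[i + 1] = pref[i] + S[i]
--
--     def SUM(l, r):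
--         return pref[r + 1] - pref[l]
--
--     memo = {}  # (l, r) -> W(l,r)
--
--     def W(l, r):
--         if l == r:
--             return S[l]
--
--         key = (l, r)
--         if key in memo:
--             return memo[key]
--
--         total = SUM(l, r)
--         L = r - l + 1
--         best_rest = inf
--
--         for k in range(1, L):
--             best_rest = min(best_rest, W(l + k, r))
--         for k in range(1, L):
--             best_rest = min(best_rest, W(l, r - k))
--
--         memo[key] = total - best_rest
--         return memo[key]
--
--     total = sum(values)
--
--     best_sister = inf
--     for a in range(n2):
--         best_sister = min(best_sister, W(a, a + n - 1))
--
--     professor_gain = total - best_sister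
--     return professor_gain
-- ===== SOURCE B (Python) =====
-- from math import inf
--
-- def max_gain_professor_hash(values):
--     """Bottom-up interval DP over window lengths with incremental running
--     minima of the prefix/suffix subproblems, so each state costs O(1)."""
--     n2 = len(values)
--     if n2 % 2 != 0:
--         raise ValueError("La lista debe tener longitud par (2n).")
--     n = n2 // 2
--
--     S = values + values
--     N = len(S)
--
--     pref = [0]
--     for x in S:
--         pref.append(pref[-1] + x)
--
--     # W[l] holds the game value of the window of the current length L
--     # starting at l (initially L = 1).
--     W = list(S)
--     # startmin[l]: min of W over windows starting at l with length < L
--     # endmin[r]:   min of W over windows ending at r with length < L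
--     startmin = [inf] * N
--     endmin = [inf] * N
--     for L in range(2, n + 1):
--         for l in range(N - L + 2):        # fold in the windows of length L-1
--             w = W[l]
--             startmin[l] = min(startmin[l], w)
--             endmin[l + L - 2] = min(endmin[l + L - 2], w)
--         W = [pref[l + L] - pref[l] - min(startmin[l], endmin[l + L - 1])
--              for l in range(N - L + 1)]
--
--     total = sum(values)
--     best_sister = min(W[a] for a in range(n2))
--     return total - best_sister
-- ===== Notes on version B (the rewrite author's own statement) =====
-- stated objective: faster
-- what changed: Replaces the top-down dict-memoized recursion, whose every state rescans all O(L) prefix and suffix subwindows, by a bottom-up DP over window lengths that maintains incremental running minima (startmin/endmin) of the already-computed subproblems, making each state O(1).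
-- outside the precondition, e.g. on max_gain_professor_hash([]): A returns -inf, B raises ValueError
import Mathlib
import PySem

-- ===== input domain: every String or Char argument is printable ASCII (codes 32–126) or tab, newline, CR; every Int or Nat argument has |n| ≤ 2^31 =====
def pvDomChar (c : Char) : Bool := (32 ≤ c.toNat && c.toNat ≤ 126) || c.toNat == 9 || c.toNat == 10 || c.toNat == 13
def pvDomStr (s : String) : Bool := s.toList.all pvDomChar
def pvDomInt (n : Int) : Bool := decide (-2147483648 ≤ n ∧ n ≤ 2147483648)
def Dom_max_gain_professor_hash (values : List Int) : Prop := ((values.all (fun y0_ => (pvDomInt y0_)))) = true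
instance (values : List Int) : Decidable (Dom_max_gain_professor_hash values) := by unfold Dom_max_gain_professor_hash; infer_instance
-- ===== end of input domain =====

-- B replaces A's dict-memoized top-down recursion (each state rescans all prefix/suffix
-- subwindows) by a bottom-up length-DP with incremental running minima; measurably faster.


-- Python's min over ints extended with +inf: none plays the role of math.inf.
def omin : Option Int → Option Int → Option Int
  | none, b => b
  | some x, none => some x
  | some x, some y => some (min x y)

-- ===== PORT A =====
-- A's `W` with the memo dict threaded through; `best_rest = inf` is `none`; the two
-- `for k in range(1, L)` loops are the two folds (Python's k = j+1); `fuel` is only a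
-- termination device (structural recursion), always sufficient on admitted inputs.
def WmemA (S pref : List Int) : Nat → Nat → Nat → PySem.Dict (Nat × Nat) Int →
    Int × PySem.Dict (Nat × Nat) Int
  | 0, l, _, memo => (S.getD l 0, memo)   -- fuel exhausted: unreachable
  | fuel + 1, l, r, memo =>
    if l = r then (S.getD l 0, memo)
    else
      match memo.get? (l, r) with
      | some v => (v, memo)
      | none =>
        let total := pref.getD (r + 1) 0 - pref.getD l 0
        let bm1 := (List.range (r - l)).foldl
          (fun (bm : Option Int × PySem.Dict (Nat × Nat) Int) j =>
            let wm := WmemA S pref fuel (l + (j + 1)) r bm.2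
            (omin bm.1 (some wm.1), wm.2)) (none, memo)
        let bm2 := (List.range (r - l)).foldl
          (fun (bm : Option Int × PySem.Dict (Nat × Nat) Int) j =>
            let wm := WmemA S pref fuel l (r - (j + 1)) bm.2
            (omin bm.1 (some wm.1), wm.2)) (bm1.1, bm1.2)
        let res := total - bm2.1.getD 0
        (res, bm2.2.insert (l, r) res)

-- A: raises on odd length (excluded by Pre_); on the empty list Python returns float -inf
-- (excluded by Pre_); the `if … then 0` below only makes the port total there.
def max_gain_professor_hash (values : List Int) : Int :=
  let n2 := values.length
  if n2 % 2 ≠ 0 then 0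
  else
    let n := n2 / 2
    let S := values ++ values
    let N := S.length
    -- pref[i+1] = pref[i] + S[i] over a preallocated list ≡ appending pref[i] + S[i]
    let pref := (List.range N).foldl (fun p i => p ++ [p.getD i 0 + S.getD i 0]) [0]
    let bm := (List.range n2).foldl
      (fun (bm : Option Int × PySem.Dict (Nat × Nat) Int) a =>
        let wm := WmemA S pref n2 a (a + n - 1) bm.2
        (omin bm.1 (some wm.1), wm.2)) (none, PySem.Dict.empty)
    values.sum - bm.1.getD 0

-- ===== PORT B =====
def max_gain_professor_hash_alt (values : List Int) : Int :=
  let n2 := values.length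
  if n2 % 2 ≠ 0 then 0
  else
    let n := n2 / 2
    let S := values ++ values
    let N := S.length
    let pref := S.foldl (fun p x => p ++ [p.getLastD 0 + x]) [0]
    let st := (List.range' 2 (n - 1)).foldl
      (fun (st : List Int × List (Option Int) × List (Option Int)) L =>
        let W := st.1
        let sm_em := (List.range (N - L + 2)).foldl
          (fun (p : List (Option Int) × List (Option Int)) l =>
            (p.1.set l (omin (p.1.getD l none) (some (W.getD l 0))),
             p.2.set (l + L - 2) (omin (p.2.getD (l + L - 2) none) (some (W.getD l 0)))))
          (st.2.1, st.2.2)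
        ((List.range (N - L + 1)).map (fun l =>
            pref.getD (l + L) 0 - pref.getD l 0 -
              (omin (sm_em.1.getD l none) (sm_em.2.getD (l + L - 1) none)).getD 0),
         sm_em.1, sm_em.2))
      (S, List.replicate N none, List.replicate N none)
    let best := match (List.range n2).map (fun a => st.1.getD a 0) with
      | [] => 0
      | x :: t => t.foldl min x
    values.sum - best

-- ===== PRECONDITION & SPEC =====
-- Pre_ excludes odd-length lists, on which A raises ValueError, and the empty list, on
-- which A returns the float -inf (not an int) and B raises ValueError.
def Pre_max_gain_professor_hash (values : List Int) : Prop :=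
  values ≠ [] ∧ values.length % 2 = 0
instance (values : List Int) : Decidable (Pre_max_gain_professor_hash values) := by
  unfold Pre_max_gain_professor_hash; infer_instance
def pvWitness_max_gain_professor_hash : List Int := [3, -1, 4, 1]

def Spec_max_gain_professor_hash (values : List Int) (out : Int) : Prop :=
  out = max_gain_professor_hash_alt values
instance (values : List Int) (out : Int) : Decidable (Spec_max_gain_professor_hash values out) := by
  unfold Spec_max_gain_professor_hash; infer_instance

-- ===== CLAIM (what is proved, stated in full; the proofs are below) =====
def Claim_equal_max_gain_professor_hash : Prop :=
  ∀ (values : List Int), Dom_max_gain_professor_hash values →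
    Pre_max_gain_professor_hash values →
    Spec_max_gain_professor_hash values (max_gain_professor_hash values)

-- ===== LEMMAS AND PROOFS =====

-- omin is Python's min on Int ∪ {+inf} (none = inf): commutative, associative.
theorem omin_none_right (a : Option Int) : omin a none = a := by cases a <;> rfl

theorem omin_assoc (a b c : Option Int) : omin (omin a b) c = omin a (omin b c) := by
  cases a <;> cases b <;> cases c <;> simp [omin, min_assoc]

theorem omin_comm (a b : Option Int) : omin a b = omin b a := by
  cases a <;> cases b <;> simp [omin, min_comm]

-- min over a list, as the Python folds compute it
def ominList (xs : List Int) : Option Int :=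
  xs.foldl (fun b x => omin b (some x)) none

theorem foldl_omin_init (xs : List Int) (b : Option Int) :
    xs.foldl (fun acc x => omin acc (some x)) b = omin b (ominList xs) := by
  induction xs generalizing b with
  | nil => simp [ominList, omin_none_right]
  | cons x t ih =>
    simp only [ominList, List.foldl_cons] at *
    rw [ih, ih (omin none (some x)), ← omin_assoc]
    rfl

theorem ominList_append (xs ys : List Int) :
    ominList (xs ++ ys) = omin (ominList xs) (ominList ys) := by
  simp only [ominList, List.foldl_append]
  rw [foldl_omin_init]
  rfl

theorem ominList_cons (x : Int) (t : List Int) :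
    ominList (x :: t) = some (t.foldl min x) := by
  simp only [ominList, List.foldl_cons, omin]
  induction t generalizing x with
  | nil => rfl
  | cons y t ih => simp [omin, ih]

theorem ominList_reverse (xs : List Int) : ominList xs.reverse = ominList xs := by
  induction xs with
  | nil => rfl
  | cons x t ih =>
    simp only [List.reverse_cons]
    rw [ominList_append, omin_comm, ih]
    have h2 : ominList (x :: t) = omin (some x) (ominList t) := by
      simp only [ominList, List.foldl_cons]
      rw [foldl_omin_init]
      rfl
    rw [h2]
    rfl

theorem map_range_reverse {α : Type} (f : Nat → α) (m : Nat) :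
    ((List.range m).map f).reverse = (List.range m).map (fun k => f (m - 1 - k)) := by
  rw [← List.map_reverse, List.range_eq_range', List.reverse_range']
  simp only [List.map_map, ← List.range_eq_range']
  apply List.map_congr_left
  intro k hk
  simp only [Function.comp]
  congr 1
  rw [List.mem_range] at hk
  omega

-- the exact value W(l, l+L-1) of A's recursion, as a function of start l and length L
def WspecF (S : List Int) : Nat → Nat → Nat → Int
  | 0, l, _ => S.getD l 0
  | fuel + 1, l, L =>
    if L ≤ 1 then S.getD l 0
    else
      ((S.drop l).take L).sum -
        (ominList
          (((List.range (L - 1)).map (fun k => WspecF S fuel (l + k + 1) (L - k - 1))) ++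
           ((List.range (L - 1)).map (fun k => WspecF S fuel l (L - k - 1))))).getD 0

def Wspec (S : List Int) (l L : Nat) : Int := WspecF S L l L

theorem WspecF_mono (S : List Int) :
    ∀ fuel fuel' l L, L ≤ fuel → L ≤ fuel' → WspecF S fuel l L = WspecF S fuel' l L := by
  intro fuel
  induction fuel with
  | zero =>
    intro fuel' l L h1 h2
    cases fuel' with
    | zero => rfl
    | succ f =>
      rw [WspecF, WspecF, if_pos (by omega)]
  | succ f ihf =>
    intro fuel' l L h1 h2
    cases fuel' with
    | zero =>
      rw [WspecF, WspecF, if_pos (by omega)]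
    | succ f' =>
      rw [WspecF, WspecF]
      by_cases hL : L ≤ 1
      · rw [if_pos hL, if_pos hL]
      · rw [if_neg hL, if_neg hL]
        have e1 : (List.range (L - 1)).map (fun k => WspecF S f (l + k + 1) (L - k - 1)) =
            (List.range (L - 1)).map (fun k => WspecF S f' (l + k + 1) (L - k - 1)) := by
          apply List.map_congr_left
          intro k hk
          rw [List.mem_range] at hk
          exact ihf f' (l + k + 1) (L - k - 1) (by omega) (by omega)
        have e2 : (List.range (L - 1)).map (fun k => WspecF S f l (L - k - 1)) =
            (List.range (L - 1)).map (fun k => WspecF S f' l (L - k - 1)) := by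
          apply List.map_congr_left
          intro k hk
          rw [List.mem_range] at hk
          exact ihf f' l (L - k - 1) (by omega) (by omega)
        rw [e1, e2]

theorem Wspec_one (S : List Int) (l : Nat) : Wspec S l 1 = S.getD l 0 := by
  rw [Wspec, WspecF, if_pos (by omega)]

theorem Wspec_eq (S : List Int) (l L : Nat) (hL : 2 ≤ L) :
    Wspec S l L =
      ((S.drop l).take L).sum -
        (ominList
          (((List.range (L - 1)).map (fun k => Wspec S (l + k + 1) (L - k - 1))) ++
           ((List.range (L - 1)).map (fun k => Wspec S l (L - k - 1))))).getD 0 := by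
  unfold Wspec
  have hL1 : L = (L - 1) + 1 := by omega
  rw [hL1, WspecF, if_neg (by omega)]
  have e1 : (List.range (L - 1 + 1 - 1)).map
        (fun k => WspecF S (L - 1) (l + k + 1) (L - 1 + 1 - k - 1)) =
      (List.range (L - 1 + 1 - 1)).map
        (fun k => WspecF S (L - 1 + 1 - k - 1) (l + k + 1) (L - 1 + 1 - k - 1)) := by
    apply List.map_congr_left
    intro k hk
    rw [List.mem_range] at hk
    exact WspecF_mono S (L - 1) (L - 1 + 1 - k - 1) (l + k + 1) (L - 1 + 1 - k - 1)
      (by omega) (by omega)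
  have e2 : (List.range (L - 1 + 1 - 1)).map (fun k => WspecF S (L - 1) l (L - 1 + 1 - k - 1)) =
      (List.range (L - 1 + 1 - 1)).map
        (fun k => WspecF S (L - 1 + 1 - k - 1) l (L - 1 + 1 - k - 1)) := by
    apply List.map_congr_left
    intro k hk
    rw [List.mem_range] at hk
    exact WspecF_mono S (L - 1) (L - 1 + 1 - k - 1) l (L - 1 + 1 - k - 1)
      (by omega) (by omega)
  rw [e1, e2]

-- the prefix-sum table both ports build
def PL (S : List Int) : List Int := (List.range (S.length + 1)).map (fun i => (S.take i).sum)

theorem getD_map_range {α : Type} [Inhabited α] (f : Nat → α) (m i : Nat) (d : α) :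
    ((List.range m).map f).getD i d = if i < m then f i else d := by
  split
  · rw [List.getD_eq_getElem] <;> simp [*]
  · rw [List.getD_eq_default] <;> simp; omega

theorem PL_getD (S : List Int) (i : Nat) (h : i ≤ S.length) :
    (PL S).getD i 0 = (S.take i).sum := by
  unfold PL
  rw [getD_map_range]
  simp [Nat.lt_succ_of_le h]

theorem sum_window (S : List Int) (l L : Nat) :
    (S.take (l + L)).sum - (S.take l).sum = ((S.drop l).take L).sum := by
  rw [List.take_add, List.sum_append]
  ring

theorem prefA_eq (S : List Int) (m : Nat) (hm : m ≤ S.length) :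
    (List.range m).foldl (fun p i => p ++ [p.getD i 0 + S.getD i 0]) [0] =
      (List.range (m + 1)).map (fun i => (S.take i).sum) := by
  induction m with
  | zero => simp
  | succ m ih =>
    rw [List.range_succ, List.foldl_append, ih (by omega)]
    simp only [List.foldl_cons, List.foldl_nil]
    rw [List.range_succ (n := m + 1), List.map_append]
    congr 1
    rw [getD_map_range]
    have hlt : m < S.length := by omega
    simp only [Nat.lt_succ_self, if_pos]
    simp [List.sum_take_succ S m hlt, List.getElem?_eq_getElem hlt]

theorem prefB_eq (S : List Int) :
    S.foldl (fun p x => p ++ [p.getLastD 0 + x]) [0] = PL S := by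
  unfold PL
  induction S using List.reverseRecOn with
  | nil => simp
  | append_singleton S x ih =>
    rw [List.foldl_append]
    have hcong : (List.range (S.length + 1)).map (fun i => ((S ++ [x]).take i).sum) =
        (List.range (S.length + 1)).map (fun i => (S.take i).sum) := by
      apply List.map_congr_left
      intro i hi
      rw [List.mem_range] at hi
      rw [List.take_append_of_le_length (by omega)]
    rw [ih]
    simp only [List.foldl_cons, List.foldl_nil, List.length_append, List.length_singleton]
    rw [List.range_succ (n := S.length + 1), List.map_append, hcong]
    congr 1
    have hfull : (S ++ [x]).take (S.length + 1) = S ++ [x] := by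
      apply List.take_of_length_le
      simp
    have hl2 : (List.range (S.length + 1)).getLast? = some S.length := by
      rw [List.range_succ]
      simp
    simp [hfull, hl2]

-- ===== A-side: the memoized recursion computes Wspec =====
def GoodM (S : List Int) (memo : PySem.Dict (Nat × Nat) Int) : Prop :=
  ∀ p v, memo.get? p = some v → p.1 < p.2 ∧ p.2 < S.length ∧ v = Wspec S p.1 (p.2 - p.1 + 1)

theorem GoodM_empty (S : List Int) : GoodM S PySem.Dict.empty := by
  intro p v h
  simp [PySem.Dict.get?_empty] at h

theorem loopA_suf_spec (S : List Int) (l r fuel : Nat) (hlr : l < r) (hr : r < S.length)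
    (IH : ∀ l' r' memo, r' - l' < r - l → l' ≤ r' → r' < S.length → GoodM S memo →
      (WmemA S (PL S) fuel l' r' memo).1 = Wspec S l' (r' - l' + 1) ∧
      GoodM S (WmemA S (PL S) fuel l' r' memo).2) :
    ∀ (js : List Nat) (b : Option Int) (memo : PySem.Dict (Nat × Nat) Int), GoodM S memo →
      (∀ j ∈ js, j + 1 ≤ r - l) →
      ((js.foldl (fun (bm : Option Int × PySem.Dict (Nat × Nat) Int) j =>
          (omin bm.1 (some (WmemA S (PL S) fuel (l + (j + 1)) r bm.2).1),
           (WmemA S (PL S) fuel (l + (j + 1)) r bm.2).2)) (b, memo)).1 =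
        (js.map (fun j => Wspec S (l + (j + 1)) (r - (l + (j + 1)) + 1))).foldl
          (fun b w => omin b (some w)) b ∧
       GoodM S ((js.foldl (fun (bm : Option Int × PySem.Dict (Nat × Nat) Int) j =>
          (omin bm.1 (some (WmemA S (PL S) fuel (l + (j + 1)) r bm.2).1),
           (WmemA S (PL S) fuel (l + (j + 1)) r bm.2).2)) (b, memo)).2)) := by
  intro js
  induction js with
  | nil =>
    intro b memo hg hb
    exact ⟨rfl, hg⟩
  | cons j js ihj =>
    intro b memo hg hb
    have hj : j + 1 ≤ r - l := hb j (by simp)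
    have hw := IH (l + (j + 1)) r memo (by omega) (by omega) hr hg
    simp only [List.foldl_cons, List.map_cons]
    rw [hw.1]
    exact ihj _ _ hw.2 (fun x hx => hb x (by simp [hx]))

theorem loopA_pre_spec (S : List Int) (l r fuel : Nat) (hlr : l < r) (hr : r < S.length)
    (IH : ∀ l' r' memo, r' - l' < r - l → l' ≤ r' → r' < S.length → GoodM S memo →
      (WmemA S (PL S) fuel l' r' memo).1 = Wspec S l' (r' - l' + 1) ∧
      GoodM S (WmemA S (PL S) fuel l' r' memo).2) :
    ∀ (js : List Nat) (b : Option Int) (memo : PySem.Dict (Nat × Nat) Int), GoodM S memo →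
      (∀ j ∈ js, j + 1 ≤ r - l) →
      ((js.foldl (fun (bm : Option Int × PySem.Dict (Nat × Nat) Int) j =>
          (omin bm.1 (some (WmemA S (PL S) fuel l (r - (j + 1)) bm.2).1),
           (WmemA S (PL S) fuel l (r - (j + 1)) bm.2).2)) (b, memo)).1 =
        (js.map (fun j => Wspec S l (r - (j + 1) - l + 1))).foldl
          (fun b w => omin b (some w)) b ∧
       GoodM S ((js.foldl (fun (bm : Option Int × PySem.Dict (Nat × Nat) Int) j =>
          (omin bm.1 (some (WmemA S (PL S) fuel l (r - (j + 1)) bm.2).1),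
           (WmemA S (PL S) fuel l (r - (j + 1)) bm.2).2)) (b, memo)).2)) := by
  intro js
  induction js with
  | nil =>
    intro b memo hg hb
    exact ⟨rfl, hg⟩
  | cons j js ihj =>
    intro b memo hg hb
    have hj : j + 1 ≤ r - l := hb j (by simp)
    have hw := IH l (r - (j + 1)) memo (by omega) (by omega) (by omega) hg
    simp only [List.foldl_cons, List.map_cons]
    rw [hw.1]
    exact ihj _ _ hw.2 (fun x hx => hb x (by simp [hx]))

theorem WmemA_spec (S : List Int) :
    ∀ fuel d l r memo, r - l = d → d < fuel → l ≤ r → r < S.length → GoodM S memo →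
      (WmemA S (PL S) fuel l r memo).1 = Wspec S l (r - l + 1) ∧
      GoodM S (WmemA S (PL S) fuel l r memo).2 := by
  intro fuel
  induction fuel with
  | zero =>
    intro d l r memo hd hdf
    omega
  | succ fuel ihf =>
    intro d l r memo hd hdf hlr hr hg
    by_cases heq : l = r
    · subst heq
      rw [WmemA, if_pos rfl]
      constructor
      · rw [show l - l + 1 = 1 from by omega, Wspec_one]
      · exact hg
    · have hlr' : l < r := by omega
      rw [WmemA, if_neg heq]
      cases hmemo : memo.get? (l, r) with
      | some v =>
        simp only
        exact ⟨(hg _ _ hmemo).2.2, hg⟩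
      | none =>
        simp only
        have IH : ∀ l' r' memo, r' - l' < r - l → l' ≤ r' → r' < S.length → GoodM S memo →
            (WmemA S (PL S) fuel l' r' memo).1 = Wspec S l' (r' - l' + 1) ∧
            GoodM S (WmemA S (PL S) fuel l' r' memo).2 := by
          intro l' r' memo' hlt hle hr' hg'
          exact ihf (r' - l') l' r' memo' rfl (by omega) hle hr' hg'
        obtain ⟨h1v, h1g⟩ := loopA_suf_spec S l r fuel hlr' hr IH (List.range (r - l)) none memo hg
          (fun j hj => by rw [List.mem_range] at hj; omega)
        obtain ⟨h2v, h2g⟩ := loopA_pre_spec S l r fuel hlr' hr IH (List.range (r - l))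
          ((List.range (r - l)).foldl (fun (bm : Option Int × PySem.Dict (Nat × Nat) Int) j =>
            (omin bm.1 (some (WmemA S (PL S) fuel (l + (j + 1)) r bm.2).1),
             (WmemA S (PL S) fuel (l + (j + 1)) r bm.2).2)) (none, memo)).1
          ((List.range (r - l)).foldl (fun (bm : Option Int × PySem.Dict (Nat × Nat) Int) j =>
            (omin bm.1 (some (WmemA S (PL S) fuel (l + (j + 1)) r bm.2).1),
             (WmemA S (PL S) fuel (l + (j + 1)) r bm.2).2)) (none, memo)).2 h1g
          (fun j hj => by rw [List.mem_range] at hj; omega)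
        have hval : ((List.range (r - l)).foldl (fun (bm : Option Int × PySem.Dict (Nat × Nat) Int) j =>
            (omin bm.1 (some (WmemA S (PL S) fuel l (r - (j + 1)) bm.2).1),
             (WmemA S (PL S) fuel l (r - (j + 1)) bm.2).2))
            (((List.range (r - l)).foldl (fun (bm : Option Int × PySem.Dict (Nat × Nat) Int) j =>
              (omin bm.1 (some (WmemA S (PL S) fuel (l + (j + 1)) r bm.2).1),
               (WmemA S (PL S) fuel (l + (j + 1)) r bm.2).2)) (none, memo)).1,
             ((List.range (r - l)).foldl (fun (bm : Option Int × PySem.Dict (Nat × Nat) Int) j =>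
              (omin bm.1 (some (WmemA S (PL S) fuel (l + (j + 1)) r bm.2).1),
               (WmemA S (PL S) fuel (l + (j + 1)) r bm.2).2)) (none, memo)).2)).1 =
            ominList
              (((List.range (r - l)).map (fun j => Wspec S (l + (j + 1)) (r - (l + (j + 1)) + 1))) ++
               ((List.range (r - l)).map (fun j => Wspec S l (r - (j + 1) - l + 1)))) := by
          rw [h2v, h1v]
          rw [foldl_omin_init, ominList_append]
          rfl
        have hres : (PL S).getD (r + 1) 0 - (PL S).getD l 0 -
            ((List.range (r - l)).foldl (fun (bm : Option Int × PySem.Dict (Nat × Nat) Int) j =>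
              (omin bm.1 (some (WmemA S (PL S) fuel l (r - (j + 1)) bm.2).1),
               (WmemA S (PL S) fuel l (r - (j + 1)) bm.2).2))
              (((List.range (r - l)).foldl (fun (bm : Option Int × PySem.Dict (Nat × Nat) Int) j =>
                (omin bm.1 (some (WmemA S (PL S) fuel (l + (j + 1)) r bm.2).1),
                 (WmemA S (PL S) fuel (l + (j + 1)) r bm.2).2)) (none, memo)).1,
               ((List.range (r - l)).foldl (fun (bm : Option Int × PySem.Dict (Nat × Nat) Int) j =>
                (omin bm.1 (some (WmemA S (PL S) fuel (l + (j + 1)) r bm.2).1),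
                 (WmemA S (PL S) fuel (l + (j + 1)) r bm.2).2)) (none, memo)).2)).1.getD 0 =
            Wspec S l (r - l + 1) := by
          rw [hval, PL_getD S (r + 1) (by omega), PL_getD S l (by omega)]
          have harith : r + 1 = l + (r - l + 1) := by omega
          rw [harith, sum_window]
          rw [Wspec_eq S l (r - l + 1) (by omega)]
          have hm1 : (List.range (r - l + 1 - 1)).map
                (fun k => Wspec S (l + k + 1) (r - l + 1 - k - 1)) =
              (List.range (r - l)).map (fun j => Wspec S (l + (j + 1)) (r - (l + (j + 1)) + 1)) := by
            rw [Nat.add_sub_cancel]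
            apply List.map_congr_left
            intro k hk
            rw [List.mem_range] at hk
            congr 1 <;> omega
          have hm2 : (List.range (r - l + 1 - 1)).map (fun k => Wspec S l (r - l + 1 - k - 1)) =
              (List.range (r - l)).map (fun j => Wspec S l (r - (j + 1) - l + 1)) := by
            rw [Nat.add_sub_cancel]
            apply List.map_congr_left
            intro k hk
            rw [List.mem_range] at hk
            congr 1
            omega
          rw [hm1, hm2]
        refine ⟨hres, ?_⟩
        intro p v hp
        rw [PySem.Dict.get?_insert] at hp
        by_cases hpe : p = (l, r)
        · rw [if_pos hpe] at hp
          injection hp with hv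
          subst hpe
          exact ⟨hlr', hr, by rw [← hv, hres]⟩
        · rw [if_neg hpe] at hp
          exact h2g p v hp

theorem prefA_PL (S : List Int) :
    (List.range S.length).foldl (fun p i => p ++ [p.getD i 0 + S.getD i 0]) [0] = PL S := by
  rw [prefA_eq S S.length le_rfl]
  rfl

theorem ominList_cons' (x : Int) (t : List Int) :
    ominList (x :: t) = omin (some x) (ominList t) := by
  simp only [ominList, List.foldl_cons]
  rw [foldl_omin_init]
  rfl

theorem foldA_spec (S : List Int) (n fuel : Nat) (hn : 1 ≤ n) (hf : n ≤ fuel) :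
    ∀ (as : List Nat) (b : Option Int) (memo : PySem.Dict (Nat × Nat) Int), GoodM S memo →
      (∀ a ∈ as, a + n - 1 < S.length) →
      (as.foldl (fun (bm : Option Int × PySem.Dict (Nat × Nat) Int) a =>
          (omin bm.1 (some (WmemA S (PL S) fuel a (a + n - 1) bm.2).1),
           (WmemA S (PL S) fuel a (a + n - 1) bm.2).2)) (b, memo)).1 =
        omin b (ominList (as.map (fun a => Wspec S a n))) := by
  intro as
  induction as with
  | nil =>
    intro b memo hg hb
    simp [ominList, omin_none_right]
  | cons a as ih =>
    intro b memo hg hb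
    have ha : a + n - 1 < S.length := hb a (by simp)
    have hw := WmemA_spec S fuel (a + n - 1 - a) a (a + n - 1) memo rfl (by omega) (by omega) ha hg
    simp only [List.foldl_cons, List.map_cons]
    rw [ih _ _ hw.2 (fun x hx => hb x (by simp [hx]))]
    rw [hw.1]
    have harg : a + n - 1 - a + 1 = n := by omega
    rw [harg, ominList_cons', ← omin_assoc]

theorem portA_value (values : List Int) (hne : values ≠ []) (h2 : values.length % 2 = 0) :
    max_gain_professor_hash values =
      values.sum - (ominList ((List.range values.length).map
        (fun a => Wspec (values ++ values) a (values.length / 2)))).getD 0 := by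
  have hlen : 0 < values.length := List.length_pos_iff.mpr hne
  have hN : (values ++ values).length = 2 * values.length := by simp [List.length_append]; ring
  simp only [max_gain_professor_hash]
  rw [if_neg (by omega)]
  rw [prefA_PL (values ++ values)]
  rw [foldA_spec (values ++ values) (values.length / 2) values.length (by omega) (by omega)
    (List.range values.length)
    none PySem.Dict.empty (GoodM_empty _)
    (fun a ha => by rw [List.mem_range] at ha; omega)]
  rfl

-- ===== B-side: the bottom-up DP computes Wspec =====
-- running minima over prefix windows (start l, lengths 1..L-1) and suffix windows (end r)
def SMs (S : List Int) (l L : Nat) : Option Int :=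
  ominList ((List.range (L - 1)).map (fun k => Wspec S l (k + 1)))

def EMs (S : List Int) (r L : Nat) : Option Int :=
  ominList ((List.range (L - 1)).map (fun k => Wspec S (r - k) (k + 1)))

theorem cands_key (S : List Int) (l L : Nat) (hL : 2 ≤ L) :
    omin (SMs S l L) (EMs S (l + L - 1) L) =
      ominList (((List.range (L - 1)).map (fun k => Wspec S (l + k + 1) (L - k - 1))) ++
                ((List.range (L - 1)).map (fun k => Wspec S l (L - k - 1)))) := by
  rw [ominList_append, omin_comm]
  congr 1
  · unfold EMs
    rw [← ominList_reverse ((List.range (L - 1)).map (fun k => Wspec S (l + k + 1) (L - k - 1)))]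
    rw [map_range_reverse]
    congr 1
    apply List.map_congr_left
    intro k hk
    rw [List.mem_range] at hk
    congr 1 <;> omega
  · unfold SMs
    rw [← ominList_reverse ((List.range (L - 1)).map (fun k => Wspec S l (L - k - 1)))]
    rw [map_range_reverse]
    congr 1
    apply List.map_congr_left
    intro k hk
    rw [List.mem_range] at hk
    congr 1
    omega

theorem SMs_succ (S : List Int) (l L : Nat) (hL : 1 ≤ L) :
    SMs S l (L + 1) = omin (SMs S l L) (some (Wspec S l L)) := by
  unfold SMs
  have h1 : L + 1 - 1 = (L - 1) + 1 := by omega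
  rw [h1, List.range_succ, List.map_append, ominList_append]
  have h2 : L - 1 + 1 = L := by omega
  simp only [List.map_cons, List.map_nil, h2]
  rfl

theorem EMs_succ (S : List Int) (r L : Nat) (hL : 1 ≤ L) :
    EMs S r (L + 1) = omin (EMs S r L) (some (Wspec S (r - (L - 1)) L)) := by
  unfold EMs
  have h1 : L + 1 - 1 = (L - 1) + 1 := by omega
  rw [h1, List.range_succ, List.map_append, ominList_append]
  have h2 : L - 1 + 1 = L := by omega
  simp only [List.map_cons, List.map_nil, h2]
  rfl

theorem getD_set_opt (xs : List (Option Int)) (i j : Nat) (v : Option Int) :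
    (xs.set i v).getD j none = if i = j ∧ i < xs.length then v else xs.getD j none := by
  rw [List.getD_eq_getElem?_getD, List.getD_eq_getElem?_getD, List.getElem?_set]
  by_cases h1 : i = j
  · subst h1
    by_cases h2 : i < xs.length
    · simp [h2]
    · simp [h2, List.getElem?_eq_none (Nat.le_of_not_lt h2)]
  · simp [h1]

theorem smFold (W : List Int) (m : Nat) :
    ∀ (sm : List (Option Int)), m ≤ sm.length →
      (((List.range m).foldl (fun sm l => sm.set l (omin (sm.getD l none) (some (W.getD l 0)))) sm).length = sm.length ∧
       ∀ i, ((List.range m).foldl (fun sm l => sm.set l (omin (sm.getD l none) (some (W.getD l 0)))) sm).getD i none =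
         if i < m then omin (sm.getD i none) (some (W.getD i 0)) else sm.getD i none) := by
  induction m with
  | zero =>
    intro sm hm
    simp
  | succ m ih =>
    intro sm hm
    rw [List.range_succ, List.foldl_append]
    obtain ⟨ihl, ihv⟩ := ih sm (by omega)
    simp only [List.foldl_cons, List.foldl_nil]
    constructor
    · rw [List.length_set, ihl]
    · intro i
      rw [getD_set_opt]
      by_cases hi : i = m
      · subst hi
        rw [if_pos ⟨rfl, by rw [ihl]; omega⟩, ihv, if_neg (by omega), if_pos (by omega)]
      · rw [if_neg (by omega), ihv]
        by_cases hi2 : i < m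
        · rw [if_pos hi2, if_pos (by omega)]
        · rw [if_neg hi2, if_neg (by omega)]

theorem emFold (W : List Int) (L : Nat) (hL : 2 ≤ L) (m : Nat) :
    ∀ (em : List (Option Int)), m + L - 2 ≤ em.length →
      (((List.range m).foldl (fun em l => em.set (l + L - 2) (omin (em.getD (l + L - 2) none) (some (W.getD l 0)))) em).length = em.length ∧
       ∀ r, ((List.range m).foldl (fun em l => em.set (l + L - 2) (omin (em.getD (l + L - 2) none) (some (W.getD l 0)))) em).getD r none =
         if L - 2 ≤ r ∧ r < m + L - 2 then omin (em.getD r none) (some (W.getD (r - (L - 2)) 0)) else em.getD r none) := by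
  induction m with
  | zero =>
    intro em hm
    constructor
    · simp
    · intro r
      rw [if_neg (by omega)]
      simp
  | succ m ih =>
    intro em hm
    rw [List.range_succ, List.foldl_append]
    obtain ⟨ihl, ihv⟩ := ih em (by omega)
    simp only [List.foldl_cons, List.foldl_nil]
    constructor
    · rw [List.length_set, ihl]
    · intro r
      rw [getD_set_opt]
      by_cases hr : r = m + L - 2
      · subst hr
        rw [if_pos ⟨rfl, by rw [ihl]; omega⟩, ihv, if_neg (by omega), if_pos (by omega)]
        congr 3
        omega
      · rw [if_neg (by omega), ihv]
        by_cases hr2 : L - 2 ≤ r ∧ r < m + L - 2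
        · rw [if_pos hr2, if_pos ⟨hr2.1, by omega⟩]
        · rw [if_neg hr2, if_neg (by omega)]

-- invariant after the stage of window length L: st = (W, startmin, endmin)
def StInv (S : List Int) (L : Nat) (st : List Int × List (Option Int) × List (Option Int)) : Prop :=
  st.1.length = S.length - L + 1 ∧
  (∀ l, l + L ≤ S.length → st.1.getD l 0 = Wspec S l L) ∧
  st.2.1.length = S.length ∧
  (∀ l, l + L ≤ S.length + 1 → st.2.1.getD l none = SMs S l L) ∧
  st.2.2.length = S.length ∧
  (∀ r, L ≤ r + 2 → r < S.length → st.2.2.getD r none = EMs S r L)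

theorem getD_replicate_none (n i : Nat) :
    (List.replicate n (none : Option Int)).getD i none = none := by
  rw [List.getD_eq_getElem?_getD, List.getElem?_replicate]
  split <;> rfl

theorem StInv_base (S : List Int) (hS : 1 ≤ S.length) :
    StInv S 1 (S, List.replicate S.length none, List.replicate S.length none) := by
  refine ⟨by show S.length = S.length - 1 + 1; omega, ?_, by simp, ?_, by simp, ?_⟩
  · intro l hl
    show S.getD l 0 = Wspec S l 1
    rw [Wspec_one]
  · intro l hl
    show (List.replicate S.length (none : Option Int)).getD l none = SMs S l 1
    rw [getD_replicate_none]
    rfl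
  · intro r h1 h2
    show (List.replicate S.length (none : Option Int)).getD r none = EMs S r 1
    rw [getD_replicate_none]
    rfl

-- one stage of B's outer loop, with pref already identified as PL S
def bodyB (S : List Int) (st : List Int × List (Option Int) × List (Option Int)) (L : Nat) :
    List Int × List (Option Int) × List (Option Int) :=
  let sm_em := (List.range (S.length - L + 2)).foldl
    (fun (p : List (Option Int) × List (Option Int)) l =>
      (p.1.set l (omin (p.1.getD l none) (some (st.1.getD l 0))),
       p.2.set (l + L - 2) (omin (p.2.getD (l + L - 2) none) (some (st.1.getD l 0)))))
    (st.2.1, st.2.2)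
  ((List.range (S.length - L + 1)).map (fun l =>
      (PL S).getD (l + L) 0 - (PL S).getD l 0 -
        (omin (sm_em.1.getD l none) (sm_em.2.getD (l + L - 1) none)).getD 0),
   sm_em.1, sm_em.2)

theorem stageStep (S : List Int) (L : Nat) (hL : 2 ≤ L) (hLN : L ≤ S.length)
    (st : List Int × List (Option Int) × List (Option Int)) (hst : StInv S (L - 1) st) :
    StInv S L (bodyB S st L) := by
  obtain ⟨hW1, hW2, hsm1, hsm2, hem1, hem2⟩ := hst
  simp only [bodyB]
  rw [PySem.List.foldl_prod_mk
    (fun sm l => sm.set l (omin (sm.getD l none) (some (st.1.getD l 0))))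
    (fun em l => em.set (l + L - 2) (omin (em.getD (l + L - 2) none) (some (st.1.getD l 0))))
    (List.range (S.length - L + 2)) st.2.1 st.2.2]
  obtain ⟨hsl, hsv⟩ := smFold st.1 (S.length - L + 2) st.2.1 (by omega)
  obtain ⟨hel, hev⟩ := emFold st.1 L hL (S.length - L + 2) st.2.2 (by omega)
  have hLm : L - 1 + 1 = L := by omega
  have hsm' : ∀ l, l + L ≤ S.length + 1 →
      ((List.range (S.length - L + 2)).foldl
        (fun sm l => sm.set l (omin (sm.getD l none) (some (st.1.getD l 0)))) st.2.1).getD l none =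
      SMs S l L := by
    intro l hl
    rw [hsv l, if_pos (by omega), hsm2 l (by omega), hW2 l (by omega)]
    rw [← SMs_succ S l (L - 1) (by omega), hLm]
  have hem' : ∀ r, L ≤ r + 2 → r < S.length →
      ((List.range (S.length - L + 2)).foldl
        (fun em l => em.set (l + L - 2) (omin (em.getD (l + L - 2) none) (some (st.1.getD l 0)))) st.2.2).getD r none =
      EMs S r L := by
    intro r h1 h2
    rw [hev r, if_pos (by omega), hem2 r (by omega) h2, hW2 (r - (L - 2)) (by omega)]
    have harg : r - (L - 2) = r - (L - 1 - 1) := by omega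
    rw [harg, ← EMs_succ S r (L - 1) (by omega), hLm]
  refine ⟨by simp, ?_, by rw [hsl, hsm1], hsm', by rw [hel, hem1], hem'⟩
  intro l hl
  rw [getD_map_range, if_pos (by omega)]
  rw [hsm' l (by omega), hem' (l + L - 1) (by omega) (by omega)]
  rw [cands_key S l L hL]
  rw [PL_getD S (l + L) (by omega), PL_getD S l (by omega), sum_window]
  rw [Wspec_eq S l L hL]

theorem outerFold (S : List Int) (hS : 2 ≤ S.length) :
    ∀ k, k + 1 ≤ S.length →
      StInv S (k + 1) ((List.range' 2 k).foldl (bodyB S)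
        (S, List.replicate S.length none, List.replicate S.length none)) := by
  intro k
  induction k with
  | zero =>
    intro hk
    exact StInv_base S (by omega)
  | succ k ih =>
    intro hk
    rw [List.range'_concat, List.foldl_append]
    simp only [List.foldl_cons, List.foldl_nil]
    have h2 : 2 + 1 * k = k + 1 + 1 := by omega
    rw [h2]
    exact stageStep S (k + 1 + 1) (by omega) (by omega) _ (by
      have := ih (by omega)
      have h1 : k + 1 + 1 - 1 = k + 1 := by omega
      rw [h1]
      exact this)


theorem portB_value (values : List Int) (hne : values ≠ []) (h2 : values.length % 2 = 0) :
    max_gain_professor_hash_alt values =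
      values.sum - (ominList ((List.range values.length).map
        (fun a => Wspec (values ++ values) a (values.length / 2)))).getD 0 := by
  have hlen : 0 < values.length := List.length_pos_iff.mpr hne
  have hN : (values ++ values).length = 2 * values.length := by simp [List.length_append]; ring
  have hport : max_gain_professor_hash_alt values =
      values.sum - (match (List.range values.length).map
          (fun a => ((List.range' 2 (values.length / 2 - 1)).foldl (bodyB (values ++ values))
            (values ++ values, List.replicate (values ++ values).length none,
             List.replicate (values ++ values).length none)).1.getD a 0) with
        | [] => (0 : Int)
        | x :: t => t.foldl min x) := by
    simp only [max_gain_professor_hash_alt]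
    rw [if_neg (by omega)]
    rw [prefB_eq]
    rfl
  rw [hport]
  have hinv := outerFold (values ++ values) (by omega) (values.length / 2 - 1) (by omega)
  have hn1 : values.length / 2 - 1 + 1 = values.length / 2 := by omega
  rw [hn1] at hinv
  have hmap : (List.range values.length).map
      (fun a => ((List.range' 2 (values.length / 2 - 1)).foldl (bodyB (values ++ values))
        (values ++ values, List.replicate (values ++ values).length none,
         List.replicate (values ++ values).length none)).1.getD a 0) =
      (List.range values.length).map (fun a => Wspec (values ++ values) a (values.length / 2)) := by
    apply List.map_congr_left
    intro a ha
    rw [List.mem_range] at ha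
    exact hinv.2.1 a (by omega)
  rw [hmap]
  cases hxs : (List.range values.length).map
      (fun a => Wspec (values ++ values) a (values.length / 2)) with
  | nil =>
    rw [List.map_eq_nil_iff, List.range_eq_nil] at hxs
    omega
  | cons x t =>
    rw [ominList_cons]
    rfl

-- ===== VERDICT (by name: the statement is the Claim_ definition above) =====
theorem max_gain_professor_hash_spec : Claim_equal_max_gain_professor_hash := by
  intro values hdom hpre
  obtain ⟨hne, h2⟩ := hpre
  unfold Spec_max_gain_professor_hash
  rw [portA_value values hne h2, portB_value values hne h2]
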